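-- pv_equiv track=rewrite | github.com/tychen5/PacketAnalysis | test_py_file/GroupPlotter.py | constructTimePair
-- ===== SOURCE A (Python) =====
-- def constructTimePair(start_date, end_date):
--     time_pair = []
--     candidate_date = [i for i in range(start_date, end_date + 1)]
--     for date in candidate_date:
--         if (date-1, 23) not in time_pair:
--             time_pair.append((date-1, 23))
--         for i in range(24):
--             time_pair.append((date, i))
--     return time_pair
-- ===== SOURCE B (Python) =====
-- def constructTimePair(start_date, end_date):
--     if start_date > end_date:
--         return []
--     return [divmod(t, 24) for t in range(24 * start_date - 1, 24 * end_date + 24)]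
-- ===== Notes on version B (the rewrite author's own statement) =====
-- stated objective: alternative
-- what changed: Replaces A's nested date/hour loops with dedup membership scans by a single flat range of absolute hour indices from 24*start_date-1 to 24*end_date+23, mapping each index t to divmod(t,24); no 'seen' list, no nested loop, no branch per date.
import Mathlib
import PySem

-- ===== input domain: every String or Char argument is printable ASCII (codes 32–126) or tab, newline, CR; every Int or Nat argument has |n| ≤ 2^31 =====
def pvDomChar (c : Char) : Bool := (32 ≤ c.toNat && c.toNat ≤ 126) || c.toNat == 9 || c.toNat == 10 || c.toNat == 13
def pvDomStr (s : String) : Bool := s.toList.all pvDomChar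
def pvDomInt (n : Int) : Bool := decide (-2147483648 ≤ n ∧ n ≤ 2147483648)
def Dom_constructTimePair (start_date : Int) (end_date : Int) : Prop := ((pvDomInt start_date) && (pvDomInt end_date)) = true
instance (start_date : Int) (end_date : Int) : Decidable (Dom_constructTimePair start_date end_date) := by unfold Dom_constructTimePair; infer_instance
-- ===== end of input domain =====

-- B replaces A's nested loops and per-date membership scan by one flat range of absolute
-- hour indices 24*start_date-1 .. 24*end_date+23, mapping each t to divmod(t, 24).

-- ===== PORT A =====
-- literal port of A: pairs become 2-element lists; list membership check and append as in the Python
def constructTimePair (start_date : Int) (end_date : Int) : List (List Int) :=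
  let candidate_date := PySem.List.pyRange start_date (end_date + 1) 1
  candidate_date.foldl (fun tp date =>
    let tp := if [date - 1, 23] ∈ tp then tp else tp ++ [[date - 1, 23]]
    (PySem.List.pyRange 0 24 1).foldl (fun tp i => tp ++ [[date, i]]) tp) []

-- ===== PORT B =====
def constructTimePair_alt (start_date : Int) (end_date : Int) : List (List Int) :=
  if start_date > end_date then []
  else (PySem.List.pyRange (24 * start_date - 1) (24 * end_date + 24) 1).map
    (fun t => [PySem.Int.floordiv t 24, PySem.Int.mod t 24])

-- ===== PRECONDITION & SPEC =====
def Spec_constructTimePair (start_date : Int) (end_date : Int) (out : List (List Int)) : Prop := out = constructTimePair_alt start_date end_date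
instance (start_date : Int) (end_date : Int) (out : List (List Int)) : Decidable (Spec_constructTimePair start_date end_date out) := by unfold Spec_constructTimePair; infer_instance

-- ===== CLAIM =====
def Claim_equal_constructTimePair : Prop := ∀ (start_date : Int) (end_date : Int), Dom_constructTimePair start_date end_date → Spec_constructTimePair start_date end_date (constructTimePair start_date end_date)

-- ===== LEMMAS AND PROOFS =====

def pvF (t : Int) : List Int := [PySem.Int.floordiv t 24, PySem.Int.mod t 24]

def pvGrid (d : Int) : List (List Int) := (PySem.List.pyRange 0 24 1).map (fun i => [d, i])

-- (24*d + k) divmod 24 = (d, k) for 0 ≤ k < 24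
theorem pvF_eq (d k : Int) (h0 : 0 ≤ k) (h1 : k < 24) : pvF (24 * d + k) = [d, k] := by
  have hd : PySem.Int.floordiv (24 * d + k) 24 = d := by
    rw [PySem.Int.floordiv_eq_iff_of_pos (by norm_num)]
    omega
  have hm := PySem.Int.floordiv_mul_add_mod (24 * d + k) 24
  rw [hd] at hm
  unfold pvF
  rw [hd]
  have : PySem.Int.mod (24 * d + k) 24 = k := by omega
  rw [this]

theorem pv_mem_grid (d : Int) : [d, 23] ∈ pvGrid d := by
  unfold pvGrid
  exact List.mem_map.mpr ⟨23, by decide, rfl⟩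

def pvStepA (tp : List (List Int)) (date : Int) : List (List Int) :=
  let tp := if [date - 1, 23] ∈ tp then tp else tp ++ [[date - 1, 23]]
  (PySem.List.pyRange 0 24 1).foldl (fun tp i => tp ++ [[date, i]]) tp

def pvStepB (out : List (List Int)) (date : Int) : List (List Int) :=
  (PySem.List.pyRange 0 24 1).foldl (fun out h => out ++ [[date, h]]) out

theorem pv_foldl_append_map {α β : Type} (f : α → β) :
    ∀ (l : List α) (acc : List β), l.foldl (fun a x => a ++ [f x]) acc = acc ++ l.map f := by
  intro l
  induction l with
  | nil => simp
  | cons x xs ih => intro acc; simp [List.foldl, ih]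

theorem pv_stepB_eq (acc : List (List Int)) (d : Int) : pvStepB acc d = acc ++ pvGrid d :=
  pv_foldl_append_map (fun i => [d, i]) (PySem.List.pyRange 0 24 1) acc

-- invariant: once the previous date's closing pair is in the accumulator,
-- A's membership branch never fires over a consecutive range of dates
theorem pv_loop_eq : ∀ (n : Nat) (d : Int) (acc : List (List Int)), [d - 1, 23] ∈ acc →
    (PySem.List.pyRange d (d + n) 1).foldl pvStepA acc
      = (PySem.List.pyRange d (d + n) 1).foldl pvStepB acc := by
  intro n
  induction n with
  | zero =>
    intro d acc _
    rw [PySem.List.pyRange_one_eq_nil (by omega)]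
    simp only [List.foldl_nil]
  | succ m ih =>
    intro d acc hmem
    rw [PySem.List.pyRange_one_cons (by omega)]
    simp only [List.foldl_cons]
    have hstep : pvStepA acc d = pvStepB acc d := by
      unfold pvStepA pvStepB
      rw [if_pos hmem]
    rw [hstep]
    have hnext : [d + 1 - 1, 23] ∈ pvStepB acc d := by
      rw [pv_stepB_eq]
      have h1 : d + 1 - 1 = d := by ring
      rw [h1]
      exact List.mem_append_right _ (pv_mem_grid d)
    push_cast
    have harg : d + ((m : Int) + 1) = (d + 1) + (m : Int) := by ring
    rw [harg]
    exact ih (d + 1) (pvStepB acc d) hnext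

-- the B-side fold as a flatMap of grids
theorem pv_foldl_stepB (l : List Int) (acc : List (List Int)) :
    l.foldl pvStepB acc = acc ++ l.flatMap pvGrid := by
  induction l generalizing acc with
  | nil => simp
  | cons x xs ih => simp [List.foldl, pv_stepB_eq, ih]

-- one date's 24-hour block of absolute hours maps to that date's grid
theorem pv_block (d : Int) :
    (PySem.List.pyRange (24 * d) (24 * d + 24) 1).map pvF = pvGrid d := by
  rw [PySem.List.pyRange_one]
  unfold pvGrid
  rw [PySem.List.pyRange_one]
  have h : (24 * d + 24 - 24 * d).toNat = 24 := by omega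
  have h0 : (24 - (0:Int)).toNat = 24 := by omega
  rw [h, h0, List.map_map, List.map_map]
  apply List.map_congr_left
  intro k hk
  have hk24 : k < 24 := List.mem_range.mp hk
  simp only [Function.comp]
  rw [pvF_eq d k (by positivity) (by exact_mod_cast hk24)]
  simp

-- the whole flat range (after the head) maps to the concatenation of grids
theorem pv_tail : ∀ (n : Nat) (s : Int),
    (PySem.List.pyRange (24 * s) (24 * s + 24 * n) 1).map pvF
      = (PySem.List.pyRange s (s + n) 1).flatMap pvGrid := by
  intro n
  induction n with
  | zero =>
    intro s
    rw [PySem.List.pyRange_one_eq_nil (by omega), PySem.List.pyRange_one_eq_nil (by omega)]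
    simp
  | succ m ih =>
    intro s
    rw [PySem.List.pyRange_one_append (24 * s) (24 * s + 24) (24 * s + 24 * (m + 1 : Nat))
        (by omega) (by push_cast; omega)]
    rw [List.map_append, pv_block]
    have h1 : (24 * s + 24 * ((m : Int) + 1)) = 24 * (s + 1) + 24 * m := by ring
    push_cast
    rw [h1]
    have h2 : (24 * s + 24 : Int) = 24 * (s + 1) := by ring
    rw [h2, ih (s + 1)]
    rw [PySem.List.pyRange_one_cons (show s < s + ((m : Int) + 1) by omega)]
    have h3 : s + ((m : Int) + 1) = (s + 1) + (m : Int) := by ring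
    rw [h3]
    simp

-- ===== VERDICT =====
theorem constructTimePair_spec : Claim_equal_constructTimePair := by
  intro s e _
  unfold Spec_constructTimePair constructTimePair constructTimePair_alt
  show (PySem.List.pyRange s (e + 1) 1).foldl pvStepA []
      = if s > e then []
        else (PySem.List.pyRange (24 * s - 1) (24 * e + 24) 1).map pvF
  by_cases h : s > e
  · rw [if_pos h, PySem.List.pyRange_one_eq_nil (by omega)]
    rfl
  · rw [if_neg h]
    -- A side: first iteration appends [s-1,23], then no branch ever fires
    rw [PySem.List.pyRange_one_cons (show s < e + 1 by omega)]
    simp only [List.foldl_cons]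
    have h1 : pvStepA [] s = pvStepB [[s - 1, 23]] s := by
      unfold pvStepA pvStepB
      rw [if_neg (List.not_mem_nil)]
      rfl
    rw [h1]
    have hmem : [s + 1 - 1, 23] ∈ pvStepB [[s - 1, 23]] s := by
      rw [pv_stepB_eq]
      have h2 : s + 1 - 1 = s := by ring
      rw [h2]
      exact List.mem_append_right _ (pv_mem_grid s)
    have h3 : (s + 1) + ((e - s).toNat : Int) = e + 1 := by omega
    rw [← h3, pv_loop_eq (e - s).toNat (s + 1) _ hmem, h3]
    rw [pv_foldl_stepB]
    -- B side: peel the head element 24*s-1, then use pv_tail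
    rw [PySem.List.pyRange_one_cons (show 24 * s - 1 < 24 * e + 24 by omega)]
    rw [List.map_cons]
    have hhead : pvF (24 * s - 1) = [s - 1, 23] := by
      have h4 : (24 * s - 1) = 24 * (s - 1) + 23 := by ring
      rw [h4, pvF_eq (s - 1) 23 (by norm_num) (by norm_num)]
    rw [hhead]
    have h5 : (24 * s - 1 + 1 : Int) = 24 * s := by ring
    rw [h5]
    have h6 : (24 * e + 24 : Int) = 24 * s + 24 * ((e + 1 - s).toNat : Nat) := by
      push_cast; omega
    rw [h6, pv_tail (e + 1 - s).toNat s]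
    have h7 : s + ((e + 1 - s).toNat : Int) = e + 1 := by omega
    rw [h7, pv_stepB_eq]
    rw [show PySem.List.pyRange s (e + 1) 1
          = s :: PySem.List.pyRange (s + 1) (e + 1) 1
        from PySem.List.pyRange_one_cons (by omega)]
    simp
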